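-- pv_equiv track=rewrite | github.com/WinrichSy/Codewars_Solutions | Python/7kyu/SimpleDirectionsReversal.py | solve
-- ===== SOURCE A (Python) =====
-- def opposite(arr):
--     new_arr = []
--     for i in arr:
--         if i=='Right': new_arr.append('Left on ')
--         elif i=='Left': new_arr.append('Right on ')
--     new_arr.append('Begin on ')
--     return new_arr
--
-- def solve(arr):
--     if len(arr)==1:
--         return arr
--
--     directions = [i.split(' ')[0] for i in arr]
--     directions = opposite(directions)
--     directions = directions[::-1]
--
--     streets = [' '.join(i.split(' ')[2:]) for i in arr][::-1]
--
--     ans = []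
--     for idx, elm in enumerate(directions):
--         ans.append(directions[idx] + streets[idx])
--
--     return ans
-- ===== SOURCE B (Python) =====
-- def solve(arr):
--     if len(arr) == 1:
--         return arr
--     streets = [' '.join(e.split(' ')[2:]) for e in arr]
--     ans = ['Begin on ' + streets[-1]]
--     j = len(streets) - 2
--     for e in reversed(arr):
--         w = e.split(' ')[0]
--         if w == 'Right':
--             ans.append('Left on ' + streets[j])
--             j -= 1
--         elif w == 'Left':
--             ans.append('Right on ' + streets[j])
--             j -= 1
--     return ans
-- ===== Notes on version B (the rewrite author's own statement) =====
-- stated objective: alternative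
-- what changed: Replaces A's three full-list transforms (map first words, filter/swap pass, two list reversals) plus an index-zip loop by a single backward walk over the entries that swaps each turn on the fly and pairs it with the preceding street via one decrementing index.
import Mathlib
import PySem

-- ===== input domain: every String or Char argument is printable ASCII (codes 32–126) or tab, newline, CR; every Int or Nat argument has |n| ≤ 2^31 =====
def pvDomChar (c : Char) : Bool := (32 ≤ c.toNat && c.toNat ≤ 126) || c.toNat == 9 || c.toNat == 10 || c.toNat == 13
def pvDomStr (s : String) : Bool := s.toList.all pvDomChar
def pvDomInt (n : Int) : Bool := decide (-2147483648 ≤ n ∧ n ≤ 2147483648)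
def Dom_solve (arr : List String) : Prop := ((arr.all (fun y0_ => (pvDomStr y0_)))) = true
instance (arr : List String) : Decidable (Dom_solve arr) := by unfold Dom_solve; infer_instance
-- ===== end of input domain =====

-- B replaces A's three whole-list transforms and index-zip loop by one backward walk with a
-- decrementing street index (objective: alternative decomposition, same cost).

-- ===== PORT A =====
-- shared subexpressions of both Pythons: e.split(' ')[0] and ' '.join(e.split(' ')[2:])
-- split(' ') (nonempty separator) always returns at least one piece, so headD "" is exact
def pvFirstWord (s : String) : String := ((PySem.Str.split? s " ").getD []).headD ""
def pvStreet (s : String) : String :=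
  PySem.Str.join " " (PySem.List.slice ((PySem.Str.split? s " ").getD []) (some 2) none)

def opposite (arr : List String) : List String :=
  (arr.foldl (fun newArr i =>
    if i = "Right" then newArr ++ ["Left on "]
    else if i = "Left" then newArr ++ ["Right on "]
    else newArr) []) ++ ["Begin on "]

-- the 'for idx, elm in enumerate(directions)' loop; none = IndexError (excluded by Pre_)
def solveLoop (directions streets : List String) : Option (List String) :=
  (PySem.List.enumerate directions 0).foldl (fun acc p =>
    acc.bind fun ans =>
      (PySem.List.pyGet? directions p.1).bind fun d =>
        (PySem.List.pyGet? streets p.1).map fun s => ans ++ [d ++ s]) (some [])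

def solve (arr : List String) : List String :=
  if arr.length = 1 then arr
  else
    let directions := arr.map (fun i => pvFirstWord i)
    let directions := opposite directions
    -- [::-1]; step -1 ≠ 0, so slice? is never none
    let directions := (PySem.List.slice? directions none none (-1)).getD []
    let streets := (PySem.List.slice? (arr.map (fun i => pvStreet i)) none none (-1)).getD []
    (solveLoop directions streets).getD []

-- ===== PORT B =====
def solve_alt (arr : List String) : List String :=
  if arr.length = 1 then arr
  else
    let streets := arr.map (fun e => pvStreet e)
    -- streets[-1]; in Python this raises only for empty arr, which is outside Pre_
    let ans := ["Begin on " ++ (PySem.List.pyGet? streets (-1)).getD ""]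
    (arr.reverse.foldl (fun (p : List String × Int) e =>
      let w := pvFirstWord e
      if w = "Right" then (p.1 ++ ["Left on " ++ PySem.List.pyGetD streets p.2 ""], p.2 - 1)
      else if w = "Left" then (p.1 ++ ["Right on " ++ PySem.List.pyGetD streets p.2 ""], p.2 - 1)
      else p) (ans, (streets.length : Int) - 2)).1

-- ===== PRECONDITION & SPEC =====
def pvIsTurn (e : String) : Bool := pvFirstWord e == "Right" || pvFirstWord e == "Left"

-- Pre_ excludes exactly the inputs where A raises IndexError: the empty list, and lists of
-- length ≥ 2 in which every entry's first word is 'Right' or 'Left' (there A's direction list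
-- outgrows its street list; A returns no value on them).
def Pre_solve (arr : List String) : Prop :=
  arr.length = 1 ∨ ∃ e ∈ arr, pvIsTurn e = false
instance (arr : List String) : Decidable (Pre_solve arr) := by unfold Pre_solve; infer_instance

def pvWitness_solve : List String := ["Begin on Main St", "Right on Elm"]

def Spec_solve (arr : List String) (out : List String) : Prop := out = solve_alt arr
instance (arr : List String) (out : List String) : Decidable (Spec_solve arr out) := by unfold Spec_solve; infer_instance

-- ===== CLAIM (what is proved, stated in full; the proofs are below) =====
def Claim_equal_solve : Prop := ∀ (arr : List String), Dom_solve arr → Pre_solve arr → Spec_solve arr (solve arr)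

-- ===== LEMMAS AND PROOFS =====

-- the swapped-turn value of an entry, or none if it is not a turn
def pvSwap? (e : String) : Option String :=
  if pvFirstWord e = "Right" then some "Left on "
  else if pvFirstWord e = "Left" then some "Right on " else none

theorem oppFold (l acc : List String) :
    l.foldl (fun newArr i =>
      if pvFirstWord i = "Right" then newArr ++ ["Left on "]
      else if pvFirstWord i = "Left" then newArr ++ ["Right on "]
      else newArr) acc
    = acc ++ l.filterMap pvSwap? := by
  induction l generalizing acc with
  | nil => simp
  | cons x xs ih =>
    simp only [List.foldl_cons, List.filterMap_cons]
    split_ifs <;> simp [pvSwap?, *]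

theorem opposite_map (arr : List String) :
    opposite (arr.map (fun i => pvFirstWord i))
    = arr.filterMap pvSwap? ++ ["Begin on "] := by
  rw [opposite, List.foldl_map]
  simpa using oppFold arr []

theorem solveLoopAux (tail : List String) : ∀ (pre ss acc : List String),
    pre.length + tail.length ≤ ss.length →
    ((PySem.List.enumerate tail (pre.length : Int)).foldl (fun acc p =>
      acc.bind fun ans =>
        (PySem.List.pyGet? (pre ++ tail) p.1).bind fun d =>
          (PySem.List.pyGet? ss p.1).map fun s => ans ++ [d ++ s]) (some acc))
    = some (acc ++ List.zipWith (· ++ ·) tail (ss.drop pre.length)) := by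
  induction tail with
  | nil => intro pre ss acc h; simp
  | cons t ts ih =>
    intro pre ss acc h
    rw [PySem.List.enumerate_cons, List.foldl_cons]
    have hlen : pre.length < ss.length := by simp at h; omega
    have h1 : PySem.List.pyGet? (pre ++ t :: ts) (pre.length : Int) = some t :=
      PySem.List.pyGet?_append_length pre ts t
    have h2 : PySem.List.pyGet? ss (pre.length : Int) = some ss[pre.length] := by
      simp [PySem.List.pyGet?_natCast, List.getElem?_eq_getElem hlen]
    simp only [Option.bind_some, h1, h2, Option.map_some]
    have e2 : pre ++ t :: ts = (pre ++ [t]) ++ ts := by simp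
    have e1 : (pre.length : Int) + 1 = (((pre ++ [t]).length : Nat) : Int) := by
      simp
    rw [e1, e2, ih (pre ++ [t]) ss (acc ++ [t ++ ss[pre.length]]) (by simp at h ⊢; omega)]
    rw [← List.getElem_cons_drop hlen, List.zipWith_cons_cons, List.append_assoc]
    simp

theorem solveLoop_eq (ds ss : List String) (h : ds.length ≤ ss.length) :
    solveLoop ds ss = some (List.zipWith (· ++ ·) ds ss) := by
  rw [solveLoop]
  simpa using solveLoopAux ds [] ss [] (by simpa using h)

theorem altLoop_eq (l : List String) : ∀ (streets acc : List String) (j : Int),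
    ((l.filterMap pvSwap?).length : Int) ≤ j + 1 → j < streets.length →
    (l.foldl (fun (p : List String × Int) e =>
      if pvFirstWord e = "Right" then
        (p.1 ++ ["Left on " ++ PySem.List.pyGetD streets p.2 ""], p.2 - 1)
      else if pvFirstWord e = "Left" then
        (p.1 ++ ["Right on " ++ PySem.List.pyGetD streets p.2 ""], p.2 - 1)
      else p) (acc, j)).1
    = acc ++ List.zipWith (· ++ ·) (l.filterMap pvSwap?)
        ((streets.take (j + 1).toNat).reverse) := by
  induction l with
  | nil => intro streets acc j _ _; simp
  | cons e ls ih =>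
    intro streets acc j hk hj
    rw [List.foldl_cons]
    by_cases hR : pvFirstWord e = "Right"
    · have hcons : (e :: ls).filterMap pvSwap? = "Left on " :: ls.filterMap pvSwap? := by
        simp [pvSwap?, hR]
      rw [hcons] at hk ⊢
      have hj0 : 0 ≤ j := by simp at hk; omega
      have hjn : j.toNat < streets.length := by omega
      have hgd : PySem.List.pyGetD streets j "" = streets[j.toNat] :=
        PySem.List.pyGetD_eq_getElem streets "" hj0 hj
      have htake : (streets.take (j + 1).toNat).reverse
          = streets[j.toNat] :: (streets.take j.toNat).reverse := by
        have hnn : (j + 1).toNat = j.toNat + 1 := by omega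
        rw [hnn, List.take_add_one, List.getElem?_eq_getElem hjn]
        simp
      simp only [if_pos hR, hgd, htake, List.zipWith_cons_cons]
      rw [ih streets (acc ++ ["Left on " ++ streets[j.toNat]]) (j - 1)
        (by simp at hk ⊢; omega) (by omega)]
      have hj1 : (j - 1 + 1).toNat = j.toNat := by omega
      rw [hj1]
      simp
    · by_cases hL : pvFirstWord e = "Left"
      · have hcons : (e :: ls).filterMap pvSwap? = "Right on " :: ls.filterMap pvSwap? := by
          simp [pvSwap?, hL]
        rw [hcons] at hk ⊢
        have hj0 : 0 ≤ j := by simp at hk; omega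
        have hjn : j.toNat < streets.length := by omega
        have hgd : PySem.List.pyGetD streets j "" = streets[j.toNat] :=
          PySem.List.pyGetD_eq_getElem streets "" hj0 hj
        have htake : (streets.take (j + 1).toNat).reverse
            = streets[j.toNat] :: (streets.take j.toNat).reverse := by
          have hnn : (j + 1).toNat = j.toNat + 1 := by omega
          rw [hnn, List.take_add_one, List.getElem?_eq_getElem hjn]
          simp
        simp only [if_neg hR, if_pos hL, hgd, htake, List.zipWith_cons_cons]
        rw [ih streets (acc ++ ["Right on " ++ streets[j.toNat]]) (j - 1)
          (by simp at hk ⊢; omega) (by omega)]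
        have hj1 : (j - 1 + 1).toNat = j.toNat := by omega
        rw [hj1]
        simp
      · have hcons : (e :: ls).filterMap pvSwap? = ls.filterMap pvSwap? := by
          simp [pvSwap?, hR, hL]
        rw [hcons] at hk ⊢
        simp only [if_neg hR, if_neg hL]
        exact ih streets acc j hk hj

-- ===== VERDICT (by name: the statement is the Claim_ definition above) =====
theorem solve_spec : Claim_equal_solve := by
  intro arr _ hpre
  unfold Spec_solve
  by_cases h1 : arr.length = 1
  · simp [solve, solve_alt, h1]
  · have hne : arr ≠ [] := by
      rintro rfl
      rcases hpre with h | ⟨e, he, _⟩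
      · exact h1 h
      · simp at he
    have hn2 : 2 ≤ arr.length := by
      have := List.length_pos_iff.mpr hne
      omega
    have hkept : (arr.filterMap pvSwap?).length < arr.length := by
      rcases hpre with h | ⟨e, he, hf⟩
      · exact absurd h h1
      · refine List.length_filterMap_lt_length_iff_exists.mpr ⟨e, he, ?_⟩
        simp [pvIsTurn] at hf
        simp [pvSwap?, hf.1, hf.2]
    have hsne : arr.map (fun e => pvStreet e) ≠ [] := by simpa using hne
    have hslen : (arr.map (fun e => pvStreet e)).length = arr.length := List.length_map ..
    -- A side
    have hA : solve arr = List.zipWith (· ++ ·)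
        ("Begin on " :: (arr.filterMap pvSwap?).reverse)
        (arr.map (fun e => pvStreet e)).reverse := by
      simp only [solve, if_neg h1, PySem.List.slice?_none_none_neg_one, Option.getD_some,
        opposite_map, List.reverse_append, List.reverse_singleton, List.singleton_append]
      have hlen : ("Begin on " :: (arr.filterMap pvSwap?).reverse).length ≤
          (arr.map (fun i => pvStreet i)).reverse.length := by
        rw [List.length_cons, List.length_reverse, List.length_reverse, List.length_map]
        omega
      rw [solveLoop_eq _ _ hlen]
      rfl
    -- B side
    have hB : solve_alt arr = ("Begin on " ++
          (arr.map (fun e => pvStreet e)).getLast hsne) ::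
        List.zipWith (· ++ ·) (arr.filterMap pvSwap?).reverse
          ((arr.map (fun e => pvStreet e)).dropLast.reverse) := by
      simp only [solve_alt, if_neg h1]
      rw [altLoop_eq arr.reverse (arr.map (fun e => pvStreet e))
        _ ((((arr.map (fun e => pvStreet e)).length : Nat) : Int) - 2)
        (by simp [List.filterMap_reverse, hslen]; omega) (by omega)]
      rw [List.filterMap_reverse]
      have ht : ((((arr.map (fun e => pvStreet e)).length : Nat) : Int) - 2 + 1).toNat
          = (arr.map (fun e => pvStreet e)).length - 1 := by omega
      rw [ht, ← List.dropLast_eq_take]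
      rw [PySem.List.pyGet?_neg_one, List.getLast?_eq_some_getLast hsne]
      simp
    rw [hA, hB]
    conv_lhs => rw [← List.dropLast_append_getLast hsne]
    rw [List.reverse_append]
    simp
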